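-- pv_equiv track=rewrite | github.com/squallstrings/advent-of-code | advent_2.py | is_invalid_id2
-- ===== SOURCE A (Python) =====
-- def is_invalid_id2(n: int) -> bool:
--     # Part 2
--     s = str(n)
--     length = len(s)
--
--     for chunk_size in range(1, length // 2 + 1):
--         if length % chunk_size != 0:
--             continue
--
--         chunk = s[:chunk_size]
--         if chunk * (length // chunk_size) == s:
--             return True
--
--     return False
-- ===== SOURCE B (Python) =====
-- def is_invalid_id2(n: int) -> bool:
--     # Part 2: s is a repetition of a proper prefix iff s occurs inside (s+s)[1:-1]
--     s = str(n)
--     return s in (s + s)[1:-1]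
-- ===== Notes on version B (the rewrite author's own statement) =====
-- stated objective: idiomatic
-- what changed: Replaces the loop over divisor chunk sizes (building and comparing each candidate repetition) with the classic string-doubling test: s is periodic iff s occurs in (s+s)[1:-1].
import Mathlib
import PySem

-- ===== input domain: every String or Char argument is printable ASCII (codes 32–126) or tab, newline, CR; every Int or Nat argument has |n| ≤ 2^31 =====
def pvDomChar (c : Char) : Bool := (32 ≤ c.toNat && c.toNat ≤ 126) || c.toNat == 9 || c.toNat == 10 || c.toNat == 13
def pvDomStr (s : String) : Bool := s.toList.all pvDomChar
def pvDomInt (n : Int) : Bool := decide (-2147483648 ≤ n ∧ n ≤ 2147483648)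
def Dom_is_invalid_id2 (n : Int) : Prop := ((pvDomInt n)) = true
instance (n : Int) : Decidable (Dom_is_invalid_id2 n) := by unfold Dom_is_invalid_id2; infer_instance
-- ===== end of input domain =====

-- B replaces A's loop over divisor chunk sizes with the string-doubling test `s in (s+s)[1:-1]` (same results; idiomatic).

-- ===== PORT A =====
-- the for-loop over range(1, length//2 + 1), with `continue` and early `return True`
def isInvalidId2Loop (s : List Char) (length : Int) : List Int → Bool
  | [] => false
  | chunk_size :: rest =>
    if PySem.Int.mod length chunk_size ≠ 0 then
      isInvalidId2Loop s length rest
    else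
      let chunk := PySem.List.slice s none (some chunk_size)
      if PySem.List.pyRepeat chunk (PySem.Int.floordiv length chunk_size) = s then true
      else isInvalidId2Loop s length rest

def is_invalid_id2 (n : Int) : Bool :=
  let s := PySem.Int.toChars n
  let length : Int := s.length
  isInvalidId2Loop s length (PySem.List.pyRange 1 (PySem.Int.floordiv length 2 + 1) 1)

-- ===== PORT B =====
def is_invalid_id2_alt (n : Int) : Bool :=
  let s := PySem.Int.toChars n
  PySem.Chars.isIn s (PySem.Chars.slice (s ++ s) (some 1) (some (-1)))

-- ===== PRECONDITION & SPEC =====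
def Spec_is_invalid_id2 (n : Int) (out : Bool) : Prop := out = is_invalid_id2_alt n
instance (n : Int) (out : Bool) : Decidable (Spec_is_invalid_id2 n out) := by unfold Spec_is_invalid_id2; infer_instance

-- ===== CLAIM (what is proved, stated in full; the proofs are below) =====
def Claim_equal_is_invalid_id2 : Prop := ∀ (n : Int), Dom_is_invalid_id2 n → Spec_is_invalid_id2 n (is_invalid_id2 n)

-- ===== LEMMAS AND PROOFS =====

theorem toDigits_ne_nil (b n : Nat) : Nat.toDigits b n ≠ [] := by
  unfold Nat.toDigits
  rw [Nat.toDigitsCore]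
  split
  · simp
  · intro h
    have := Nat.toDigitsCore_lens_eq b n (n / b) (Nat.digitChar (n % b)) []
    rw [h] at this
    simp at this

theorem toChars_ne_nil (n : Int) : PySem.Int.toChars n ≠ [] := by
  simp only [PySem.Int.toChars]
  split
  · simp
  · exact toDigits_ne_nil 10 _

-- flatten of replicate adds
theorem flat_rep_add {α : Type} (a b : Nat) (c : List α) :
    (List.replicate a c).flatten ++ (List.replicate b c).flatten = (List.replicate (a + b) c).flatten := by
  induction a with
  | zero => simp
  | succ a ih =>
    rw [show a + 1 + b = (a + b) + 1 from by omega, List.replicate_succ, List.flatten_cons]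
    simp [List.replicate_succ, List.append_assoc, ih]

-- a full repetition of the length-d prefix gives a fixed rotation by d
theorem rotate_of_rep (s : List Char) (d q : Nat) (hd : 0 < d) (hq : 2 ≤ q)
    (hlen : s.length = q * d) (hrep : (List.replicate q (s.take d)).flatten = s) :
    s.rotate d = s := by
  have hdle : d ≤ s.length := by nlinarith
  have hc : (s.take d).length = d := by simp [hdle]
  have hdrop : s.drop d = (List.replicate (q - 1) (s.take d)).flatten := by
    conv_lhs => rw [← hrep]
    have hq1 : q = 1 + (q - 1) := by omega
    rw [hq1, List.replicate_add, List.flatten_append]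
    simp [hc]
  rw [List.rotate_eq_drop_append_take hdle, hdrop]
  calc (List.replicate (q - 1) (s.take d)).flatten ++ s.take d
      = (List.replicate (q - 1) (s.take d)).flatten ++ (List.replicate 1 (s.take d)).flatten := by
        simp
    _ = (List.replicate ((q - 1) + 1) (s.take d)).flatten := flat_rep_add _ _ _
    _ = (List.replicate q (s.take d)).flatten := by congr 2; omega
    _ = s := hrep

-- a fixed rotation by d with d ∣ length gives a full repetition of the length-d prefix
theorem rep_of_rotate (q : Nat) : ∀ (d : Nat) (s : List Char), 0 < d → s.length = q * d →
    s.rotate d = s → s = (List.replicate q (s.take d)).flatten := by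
  induction q with
  | zero =>
    intro d s _ hlen _
    have : s = [] := List.eq_nil_of_length_eq_zero (by omega)
    simp [this]
  | succ q ih =>
    intro d s hd hlen hrot
    have hdle : d ≤ s.length := by nlinarith
    have hc : (s.take d).length = d := by simp [hdle]
    rw [List.rotate_eq_drop_append_take hdle] at hrot
    rcases Nat.eq_zero_or_pos q with hq | hq
    · subst hq
      have : d = s.length := by omega
      simp [this]
    · -- t = s.drop d commutes with c = s.take d
      have ht : (s.drop d).length = q * d := by simp [hlen]; ring_nf; omega
      have hdt : d ≤ (s.drop d).length := by nlinarith
      have hcomm : s.drop d ++ s.take d = s.take d ++ s.drop d := by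
        rw [hrot, List.take_append_drop]
      have htake : (s.drop d).take d = s.take d := by
        have h1 : (s.drop d ++ s.take d).take d = (s.drop d).take d :=
          List.take_append_of_le_length hdt
        have h2 : (s.take d ++ s.drop d).take d = s.take d := List.take_left' hc
        rw [← h1, hcomm, h2]
      have hrott : (s.drop d).rotate d = s.drop d := by
        have key := congrArg (List.drop d) hcomm
        rw [List.drop_append_of_le_length hdt, List.drop_left' hc] at key
        rw [List.rotate_eq_drop_append_take hdt, htake, key]
      have hIH := ih d (s.drop d) hd ht hrott
      rw [htake] at hIH
      calc s = s.take d ++ s.drop d := (List.take_append_drop d s).symm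
        _ = s.take d ++ (List.replicate q (s.take d)).flatten := by rw [← hIH]
        _ = (List.replicate (q + 1) (s.take d)).flatten := by
              simp [List.replicate_succ]

-- characterization of A's loop
theorem loop_true_iff (s : List Char) (length : Int) (ks : List Int) :
    isInvalidId2Loop s length ks = true ↔
    ∃ k ∈ ks, PySem.Int.mod length k = 0 ∧
      PySem.List.pyRepeat (PySem.List.slice s none (some k)) (PySem.Int.floordiv length k) = s := by
  induction ks with
  | nil => simp [isInvalidId2Loop]
  | cons k rest ih =>
    simp only [isInvalidId2Loop, List.mem_cons]
    split_ifs with h1 h2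
    · rw [ih]
      constructor
      · rintro ⟨k', hk', hh⟩; exact ⟨k', Or.inr hk', hh⟩
      · rintro ⟨k', hk' | hk', hh⟩
        · exact absurd (hk' ▸ hh.1) h1
        · exact ⟨k', hk', hh⟩
    · constructor
      · intro _; exact ⟨k, Or.inl rfl, not_not.mp h1, h2⟩
      · intro _; rfl
    · rw [ih]
      constructor
      · rintro ⟨k', hk', hh⟩; exact ⟨k', Or.inr hk', hh⟩
      · rintro ⟨k', hk' | hk', hh⟩
        · subst hk'; exact absurd hh.2 h2
        · exact ⟨k', hk', hh⟩

-- A in Nat terms: some proper-divisor prefix repetition equals s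
theorem portA_iff (n : Int) :
    is_invalid_id2 n = true ↔
    ∃ m : Nat, 1 ≤ m ∧ m ≤ (PySem.Int.toChars n).length / 2 ∧ (PySem.Int.toChars n).length % m = 0 ∧
      (List.replicate ((PySem.Int.toChars n).length / m) ((PySem.Int.toChars n).take m)).flatten
        = PySem.Int.toChars n := by
  set s := PySem.Int.toChars n with hs
  set L := s.length with hL
  show isInvalidId2Loop s (L : Int) _ = true ↔ _
  rw [loop_true_iff]
  constructor
  · rintro ⟨k, hkmem, hmod, hrep⟩
    rw [PySem.List.mem_pyRange_one] at hkmem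
    have hk1 : 1 ≤ k := hkmem.1
    have hk2 : k < PySem.Int.floordiv (L : Int) 2 + 1 := hkmem.2
    have hkfd : (PySem.Int.floordiv (L : Int) 2) = ((L / 2 : Nat) : Int) := by
      exact_mod_cast PySem.Int.floordiv_natCast L 2
    obtain ⟨m, rfl⟩ : ∃ m : Nat, k = (m : Int) := ⟨k.toNat, by omega⟩
    refine ⟨m, by omega, by omega, ?_, ?_⟩
    · have := PySem.Int.mod_natCast L m
      rw [this] at hmod
      exact_mod_cast hmod
    · rw [PySem.List.slice_to_natCast] at hrep
      rw [PySem.Int.floordiv_natCast L m] at hrep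
      simpa [PySem.List.pyRepeat] using hrep
  · rintro ⟨m, hm1, hm2, hmod, hrep⟩
    refine ⟨(m : Int), ?_, ?_, ?_⟩
    · rw [PySem.List.mem_pyRange_one]
      have hkfd : (PySem.Int.floordiv (L : Int) 2) = ((L / 2 : Nat) : Int) := by
        exact_mod_cast PySem.Int.floordiv_natCast L 2
      constructor
      · omega
      · rw [hkfd]; omega
    · rw [PySem.Int.mod_natCast L m]; exact_mod_cast hmod
    · rw [PySem.List.slice_to_natCast, PySem.Int.floordiv_natCast L m]
      simpa [PySem.List.pyRepeat] using hrep

-- the middle of the doubled string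
theorem slice_one_negone (xs : List Char) :
    PySem.List.slice xs (some 1) (some (-1)) = (xs.drop 1).take (xs.length - 2) := by
  have h1 : PySem.List.slice xs (some 1) (some (-1))
      = (xs.drop (PySem.List.clampIdx xs.length 1)).take
          (PySem.List.clampIdx xs.length (-1) - PySem.List.clampIdx xs.length 1) := by
    simp [PySem.List.slice]
  rw [h1, PySem.List.clampIdx_neg_one]
  have h2 : PySem.List.clampIdx xs.length 1 = min 1 xs.length := by
    have h := PySem.List.clampIdx_natCast xs.length 1
    exact_mod_cast h
  rw [h2]
  rcases Nat.eq_zero_or_pos xs.length with h | h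
  · have : xs = [] := List.eq_nil_of_length_eq_zero h
    simp [this]
  · have h3 : min 1 xs.length = 1 := by omega
    rw [h3, show xs.length - 1 - 1 = xs.length - 2 from by omega]

-- B in rotation terms: some nontrivial rotation fixes s
theorem portB_iff (n : Int) :
    is_invalid_id2_alt n = true ↔
    ∃ i : Nat, 1 ≤ i ∧ i ≤ (PySem.Int.toChars n).length - 1 ∧
      (PySem.Int.toChars n).rotate i = PySem.Int.toChars n := by
  set s := PySem.Int.toChars n with hs
  set L := s.length with hL
  have hsne : s ≠ [] := by rw [hs]; exact toChars_ne_nil n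
  have hL1 : 1 ≤ L := by
    have := List.length_pos_of_ne_nil hsne
    omega
  show PySem.Chars.isIn s (PySem.Chars.slice (s ++ s) (some 1) (some (-1))) = true ↔ _
  rw [PySem.Chars.slice_eq_listSlice, slice_one_negone]
  have hlen2 : (s ++ s).length = 2 * L := by
    rw [List.length_append]; omega
  rw [hlen2, ← PySem.Chars.exists_prefix_drop_iff_isIn]
  constructor
  · rintro ⟨j, hpre⟩
    have hlen3 : ((((s ++ s).drop 1).take (2 * L - 2)).drop j).length = 2 * L - 2 - j := by
      simp only [List.length_drop, List.length_take, List.length_append, ← hL]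
      omega
    have hplen : L ≤ 2 * L - 2 - j := by
      have h := hpre.length_le
      rw [hlen3, ← hL] at h
      exact h
    have hjle : j ≤ L - 2 := by omega
    have hiL : j + 1 ≤ L := by omega
    refine ⟨j + 1, by omega, by omega, ?_⟩
    have h1 : (((s ++ s).drop 1).take (2 * L - 2)).drop j
        = ((s ++ s).drop (j + 1)).take (2 * L - 2 - j) := by
      rw [List.drop_take, List.drop_drop, Nat.add_comm 1 j]
    rw [h1] at hpre
    have hpre2 : s <+: (s ++ s).drop (j + 1) := hpre.trans (List.take_prefix _ _)
    rw [List.drop_append_of_le_length hiL] at hpre2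
    have heq : s = (s.drop (j + 1) ++ s).take L := by
      rcases hpre2 with ⟨t, ht⟩
      rw [← ht, List.take_append_of_le_length (le_of_eq hL), List.take_of_length_le (le_of_eq hL.symm)]
    have htk : (s.drop (j + 1) ++ s).take L = s.drop (j + 1) ++ s.take (j + 1) := by
      rw [List.take_append,
        List.take_of_length_le (by rw [List.length_drop]; omega),
        List.length_drop, ← hL, show L - (L - (j + 1)) = j + 1 from by omega]
    rw [List.rotate_eq_drop_append_take hiL, ← htk, ← heq]
  · rintro ⟨i, hi1, hi2, hrot⟩
    have hL2 : 2 ≤ L := by omega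
    have hiL : i ≤ L := by omega
    refine ⟨i - 1, ?_⟩
    have h1 : (((s ++ s).drop 1).take (2 * L - 2)).drop (i - 1)
        = ((s ++ s).drop i).take (2 * L - 2 - (i - 1)) := by
      rw [List.drop_take, List.drop_drop, show 1 + (i - 1) = i from by omega]
    rw [h1, List.drop_append_of_le_length hiL]
    rw [List.rotate_eq_drop_append_take hiL] at hrot
    have hpre0 : s <+: s.drop i ++ s := by
      refine ⟨s.drop i, ?_⟩
      calc s ++ s.drop i = (s.drop i ++ s.take i) ++ s.drop i := by rw [hrot]
        _ = s.drop i ++ (s.take i ++ s.drop i) := by rw [List.append_assoc]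
        _ = s.drop i ++ s := by rw [List.take_append_drop]
    rw [List.prefix_take_iff]
    refine ⟨hpre0, ?_⟩
    rw [← hL]
    omega

-- the core combinatorial equivalence: proper-prefix periodicity ↔ nontrivial fixed rotation
theorem period_iff_rotate (s : List Char) (hne : s ≠ []) :
    (∃ m : Nat, 1 ≤ m ∧ m ≤ s.length / 2 ∧ s.length % m = 0 ∧
        (List.replicate (s.length / m) (s.take m)).flatten = s) ↔
    (∃ i : Nat, 1 ≤ i ∧ i ≤ s.length - 1 ∧ s.rotate i = s) := by
  set L := s.length with hL
  have hL1 : 1 ≤ L := by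
    cases s with
    | nil => exact absurd rfl hne
    | cons a t => simp [hL]
  constructor
  · rintro ⟨m, hm1, hm2, hmod, hrep⟩
    have hq2 : 2 ≤ L / m := by
      have h2m : 2 * m ≤ L := by
        have := Nat.div_mul_le_self L 2
        omega
      exact (Nat.le_div_iff_mul_le (by omega)).mpr (by omega)
    have hlen : L = (L / m) * m := (Nat.div_mul_cancel (Nat.dvd_of_mod_eq_zero hmod)).symm
    refine ⟨m, hm1, by omega, rotate_of_rep s m (L / m) (by omega) hq2 hlen hrep⟩
  · rintro ⟨i, hi1, hi2, hrot⟩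
    -- take the least positive fixed rotation
    have hex : ∃ j : Nat, 1 ≤ j ∧ s.rotate j = s := ⟨i, hi1, hrot⟩
    set d := Nat.find hex with hd
    obtain ⟨hd1, hdrot⟩ := Nat.find_spec hex
    rw [← hd] at hd1 hdrot
    have hdle : d ≤ i := Nat.find_le ⟨hi1, hrot⟩
    -- rotations by multiples of d fix s
    have hmul : ∀ t : Nat, s.rotate (d * t) = s := by
      intro t
      induction t with
      | zero => simp
      | succ t ih =>
        have : d * (t + 1) = d * t + d := by ring
        rw [this, ← List.rotate_rotate, ih, hdrot]
    -- d divides L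
    have hmod : L % d = 0 := by
      by_contra hne0
      have hr1 : 1 ≤ L % d := by omega
      have hrlt : L % d < d := Nat.mod_lt _ (by omega)
      have : s.rotate (L % d) = s := by
        have h1 : s.rotate L = s := by rw [hL]; exact List.rotate_length s
        have h2 : s.rotate (d * (L / d) + L % d) = s := by
          rw [Nat.div_add_mod L d]
          exact h1
        rw [← List.rotate_rotate, hmul] at h2
        exact h2
      exact absurd ⟨hr1, this⟩ (Nat.find_min hex hrlt)
    have hdvd : d ∣ L := Nat.dvd_of_mod_eq_zero hmod
    have hdltL : d < L := by omega
    have hq2 : 2 ≤ L / d := by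
      rcases hdvd with ⟨q, hqe⟩
      have : 2 ≤ q := by nlinarith
      rw [hqe, Nat.mul_div_cancel_left _ (by omega)]
      exact this
    have hd2 : d ≤ L / 2 := by
      have h2d : 2 * d ≤ (L / d) * d := by nlinarith
      rw [← Nat.div_mul_cancel hdvd]
      omega
    refine ⟨d, hd1, hd2, hmod, ?_⟩
    exact (rep_of_rotate (L / d) d s (by omega)
      (by rw [Nat.div_mul_cancel hdvd]) hdrot).symm

-- ===== VERDICT (by name: the statement is the Claim_ definition above) =====
theorem is_invalid_id2_spec : Claim_equal_is_invalid_id2 := by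
  intro n _
  unfold Spec_is_invalid_id2
  have h := (portA_iff n).trans ((period_iff_rotate _ (toChars_ne_nil n)).trans (portB_iff n).symm)
  cases hA : is_invalid_id2 n
  · cases hB : is_invalid_id2_alt n
    · rfl
    · exact absurd (h.mpr hB) (by simp [hA])
  · exact (h.mp hA).symm
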